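-- pv_equiv track=rewrite | github.com/suulcoder/Compiladores3 | scannerGenerator.py | processToken
-- ===== SOURCE A (Python) =====
-- COMILLAS = '"'
--
-- EXCEPTKEYWORDS = 'EXCEPT KEYWORDS'
--
-- def processToken(setTokens, dictCharacters):
--     bandera = 0
--
--     comillas = 0
--     saltos = None
--     expresionRegular = ''
--
--     if EXCEPTKEYWORDS in setTokens:
--         bandera = 1
--         setTokens = setTokens.replace(EXCEPTKEYWORDS, '').strip()
--
--     for i in range(len(setTokens)):
--         if not saltos:
--             if setTokens[i] == COMILLAS:
--                 comillas = comillas + 1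
--                 continue
--
--             if comillas % 2 == 0:
--                 if COMILLAS in setTokens[i:]:
--                     indice = setTokens[i:].index('"')
--                     saltos = indice - 1
--
--                     tokenReplace = setTokens[i:indice + i]
--
--                 else:
--                     saltos = len(setTokens[i:])
--                     tokenReplace = setTokens[i:]
--
--                 tokenReplaceDict = tokenReplace.replace('{', '(').replace('}', ')*').replace('[', '(').replace(']', ')?')
--
--                 for key in sorted(dictCharacters, key=len, reverse=True):
--                     if key in tokenReplaceDict:
--                         preRegex = ''
--                         for value in dictCharacters[key]:
--                             preRegex = preRegex + str(value) + '|'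
--
--                         tokenReplaceDict = tokenReplaceDict.replace(key, '(' + preRegex[:-1] + ')')
--
--                 expresionRegular = expresionRegular + tokenReplaceDict
--
--             else:
--                 expresionRegular = expresionRegular + str(ord(setTokens[i]))
--
--         else:
--             saltos = saltos - 1
--
--     return expresionRegular, bandera
-- ===== SOURCE B (Python) =====
-- COMILLAS = '"'
--
-- EXCEPTKEYWORDS = 'EXCEPT KEYWORDS'
--
--
-- def _substitute(part, dictCharacters):
--     part = part.replace('{', '(').replace('}', ')*').replace('[', '(').replace(']', ')?')
--     for key in sorted(dictCharacters, key=len, reverse=True):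
--         if key in part:
--             preRegex = ''
--             for value in dictCharacters[key]:
--                 preRegex = preRegex + str(value) + '|'
--             part = part.replace(key, '(' + preRegex[:-1] + ')')
--     return part
--
--
-- def processToken(setTokens, dictCharacters):
--     bandera = 0
--     if EXCEPTKEYWORDS in setTokens:
--         bandera = 1
--         setTokens = setTokens.replace(EXCEPTKEYWORDS, '').strip()
--
--     expresionRegular = ''
--     for i, part in enumerate(setTokens.split(COMILLAS)):
--         if i % 2 == 0:
--             if part:
--                 expresionRegular = expresionRegular + _substitute(part, dictCharacters)
--         else:
--             for ch in part:
--                 expresionRegular = expresionRegular + str(ord(ch))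
--     return expresionRegular, bandera
-- ===== Notes on version B (the rewrite author's own statement) =====
-- stated objective: simpler
-- what changed: Replaces the per-character index loop with its saltos skip counter, repeated setTokens[i:] slicing and index('"') scans by a single split('"') followed by one pass over the parts (even parts substituted, odd parts turned into ord codes).
import Mathlib
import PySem

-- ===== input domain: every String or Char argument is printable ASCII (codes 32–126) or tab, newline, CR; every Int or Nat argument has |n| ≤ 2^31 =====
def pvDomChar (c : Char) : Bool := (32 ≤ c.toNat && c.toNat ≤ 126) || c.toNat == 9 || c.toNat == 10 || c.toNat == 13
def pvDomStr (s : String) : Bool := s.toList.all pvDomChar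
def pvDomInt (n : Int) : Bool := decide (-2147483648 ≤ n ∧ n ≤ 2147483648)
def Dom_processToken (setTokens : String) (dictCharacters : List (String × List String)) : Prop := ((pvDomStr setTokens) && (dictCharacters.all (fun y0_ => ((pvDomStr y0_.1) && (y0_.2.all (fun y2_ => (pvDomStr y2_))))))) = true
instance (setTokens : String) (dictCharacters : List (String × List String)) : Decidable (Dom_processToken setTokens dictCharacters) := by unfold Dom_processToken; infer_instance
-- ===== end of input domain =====

-- B replaces A's per-character loop with saltos skip counter and repeated slice/index scans
-- by one split on '"' and a single pass over the parts (same return value; objective: simpler).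


-- ===== PORT A =====

-- Shared by both ports because the same Python lines occur verbatim in A and in B:
-- the EXCEPT KEYWORDS preamble, and the per-chunk brace/dictionary substitution.

-- "if EXCEPTKEYWORDS in setTokens: bandera = 1; setTokens = setTokens.replace(EXCEPTKEYWORDS, '').strip()"
def pvPreamble (setTokens : String) : List Char × Int :=
  if PySem.Str.isIn "EXCEPT KEYWORDS" setTokens then
    (PySem.Chars.strip (PySem.Chars.replace setTokens.toList "EXCEPT KEYWORDS".toList []), 1)
  else (setTokens.toList, 0)

-- tokenReplace.replace('{','(').replace('}',')*').replace('[','(').replace(']',')?'),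
-- then the "for key in sorted(dictCharacters, key=len, reverse=True)" replacement loop.
-- dictCharacters[key] is the assoc-list first-match lookup (the key comes from the dict, so it is
-- always present; .getD [] is never reached); preRegex[:-1] is List.dropLast (exact for [:-1]).
def pvSubst (dictCharacters : List (String × List String)) (chunk : List Char) : List Char :=
  let t := PySem.Chars.replace (PySem.Chars.replace (PySem.Chars.replace
             (PySem.Chars.replace chunk ['{'] ['(']) ['}'] [')', '*']) ['['] ['(']) [']'] [')', '?']
  (PySem.List.sorted (dictCharacters.map (·.1)) (fun k => PySem.Str.len k) true).foldl
    (fun t key =>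
      if PySem.Chars.isIn key.toList t then
        let preRegex := ((List.lookup key dictCharacters).getD []).foldl
          (fun p v => p ++ v.toList ++ ['|']) []
        PySem.Chars.replace t key.toList ('(' :: (preRegex.dropLast ++ [')']))
      else t) t

-- A's "for i in range(len(setTokens))" loop, as structural recursion on the remaining suffix
-- (setTokens[i:] is exactly the suffix, setTokens[i:indice+i] is its take).
-- saltos : Nat — Python's saltos is None or a nonnegative int and is only tested by truthiness,
-- so None and 0 coincide; comillas : Nat — a nonnegative counter tested by % 2 == 0.
-- expresionRegular is carried REVERSED (each append 'acc + x' is List.reverseAux x acc, the same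
-- string in reverse); the final .reverse restores it — Python's str += is amortized O(1), a plain
-- list append here would not evaluate on large inputs.
def pvLoopA (dictCharacters : List (String × List String)) :
    List Char → Nat → Nat → List Char → List Char
  | [], _, _, acc => acc
  | c :: rest, comillas, saltos, acc =>
    if saltos = 0 then
      if c = '"' then pvLoopA dictCharacters rest (comillas + 1) saltos acc
      else if comillas % 2 = 0 then
        if PySem.Chars.isIn ['"'] (c :: rest) then
          -- indice = setTokens[i:].index('"')  (≥ 1 here since c ≠ '"'; toNat is exact)
          let indice := (PySem.Chars.find (c :: rest) ['"']).toNat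
          pvLoopA dictCharacters rest comillas (indice - 1)
            (List.reverseAux (pvSubst dictCharacters ((c :: rest).take indice)) acc)
        else
          pvLoopA dictCharacters rest comillas (c :: rest).length
            (List.reverseAux (pvSubst dictCharacters (c :: rest)) acc)
      else pvLoopA dictCharacters rest comillas saltos
        (List.reverseAux (PySem.Int.toChars (c.toNat : Int)) acc)
    else pvLoopA dictCharacters rest comillas (saltos - 1) acc

def processToken (setTokens : String) (dictCharacters : List (String × List String)) : String × Int :=
  let p := pvPreamble setTokens
  (String.ofList (pvLoopA dictCharacters p.1 0 0 []).reverse, p.2)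

-- ===== PORT B =====

-- setTokens.split('"'): hand-ported split for the one-character separator '"'
-- (exact: Python's str.split with a 1-char sep keeps empty pieces, [''] on '').
-- Tail-recursive: cur is the current piece reversed, acc the finished pieces reversed
-- (a non-tail recursion overflows the interpreter stack on long inputs).
def pvSplitQGo : List Char → List Char → List (List Char) → List (List Char)
  | [], cur, acc => (cur.reverse :: acc).reverse
  | c :: rest, cur, acc =>
    if c = '"' then pvSplitQGo rest [] (cur.reverse :: acc)
    else pvSplitQGo rest (c :: cur) acc

def pvSplitQ (s : List Char) : List (List Char) := pvSplitQGo s [] []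

-- "for i, part in enumerate(parts)" with the accumulated expresionRegular; i : Nat is exact
-- since enumerate starts at 0 and only i % 2 is read.  As in port A, expresionRegular is carried
-- reversed (List.reverseAux per append) and restored by the final .reverse.
def pvGoB (dictCharacters : List (String × List String)) :
    List (List Char) → Nat → List Char → List Char
  | [], _, acc => acc
  | part :: rest, i, acc =>
    if i % 2 = 0 then
      pvGoB dictCharacters rest (i + 1)
        (if part = [] then acc else List.reverseAux (pvSubst dictCharacters part) acc)
    else
      pvGoB dictCharacters rest (i + 1)
        (part.foldl (fun a ch => List.reverseAux (PySem.Int.toChars (ch.toNat : Int)) a) acc)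

def processToken_alt (setTokens : String) (dictCharacters : List (String × List String)) : String × Int :=
  let p := pvPreamble setTokens
  (String.ofList (pvGoB dictCharacters (pvSplitQ p.1) 0 []).reverse, p.2)

-- ===== PRECONDITION & SPEC =====
def Spec_processToken (setTokens : String) (dictCharacters : List (String × List String)) (out : String × Int) : Prop := out = processToken_alt setTokens dictCharacters
instance (setTokens : String) (dictCharacters : List (String × List String)) (out : String × Int) : Decidable (Spec_processToken setTokens dictCharacters out) := by unfold Spec_processToken; infer_instance

-- ===== CLAIM (what is proved, stated in full; the proofs are below) =====
def Claim_equal_processToken : Prop := ∀ (setTokens : String) (dictCharacters : List (String × List String)), Dom_processToken setTokens dictCharacters → Spec_processToken setTokens dictCharacters (processToken setTokens dictCharacters)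

-- ===== LEMMAS AND PROOFS =====

-- Proof-side structural version of pvSplitQ, and the bridge to the tail-recursive port.
def pvSplitS : List Char → List (List Char)
  | [] => [[]]
  | c :: rest =>
    if c = '"' then [] :: pvSplitS rest
    else match pvSplitS rest with
      | [] => [[c]]
      | h :: t => (c :: h) :: t

def pvConsHead (x : List Char) : List (List Char) → List (List Char)
  | [] => [x]
  | h :: t => (x ++ h) :: t

theorem pvSplitS_ne_nil (s : List Char) : pvSplitS s ≠ [] := by
  cases s with
  | nil => simp [pvSplitS]
  | cons c rest =>
    simp only [pvSplitS]
    split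
    · simp
    · cases h : pvSplitS rest <;> simp

theorem pvSplitQGo_eq (s : List Char) : ∀ cur acc,
    pvSplitQGo s cur acc = acc.reverse ++ pvConsHead cur.reverse (pvSplitS s) := by
  induction s with
  | nil => intro cur acc; simp [pvSplitQGo, pvSplitS, pvConsHead]
  | cons c rest ih =>
    intro cur acc
    by_cases hc : c = '"'
    · cases hr : pvSplitS rest with
      | nil => exact absurd hr (pvSplitS_ne_nil rest)
      | cons h t =>
        simp [pvSplitQGo, pvSplitS, pvConsHead, hc, ih, hr]
    · cases hr : pvSplitS rest with
      | nil => exact absurd hr (pvSplitS_ne_nil rest)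
      | cons h t =>
        simp [pvSplitQGo, pvSplitS, pvConsHead, hc, ih, hr]

theorem pvSplitQ_eq_pvSplitS (s : List Char) : pvSplitQ s = pvSplitS s := by
  cases hr : pvSplitS s with
  | nil => exact absurd hr (pvSplitS_ne_nil s)
  | cons h t => simp [pvSplitQ, pvSplitQGo_eq, pvConsHead, hr]



theorem pvSplitS_no_quote (s : List Char) (h : ('"' : Char) ∉ s) : pvSplitS s = [s] := by

  induction s with
  | nil => rfl
  | cons c rest ih =>
    simp only [List.mem_cons, not_or] at h
    have hr := ih h.2
    simp only [pvSplitS]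
    rw [if_neg (Ne.symm h.1), hr]


theorem pvSplitS_decomp (pre suf : List Char) (h : ('"' : Char) ∉ pre) :
    pvSplitS (pre ++ '"' :: suf) = pre :: pvSplitS suf := by

  induction pre with
  | nil => simp [pvSplitS]
  | cons a pre' ih =>
    simp only [List.mem_cons, not_or] at h
    simp [pvSplitS, ih h.2, Ne.symm h.1]


theorem pv_exists_decomp (s : List Char) (h : ('"' : Char) ∈ s) :
    ∃ pre suf, s = pre ++ '"' :: suf ∧ ('"' : Char) ∉ pre := by

  induction s with
  | nil => simp at h
  | cons c rest ih =>
    by_cases hc : c = '"'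
    · exact ⟨[], rest, by simp [hc], by simp⟩
    · have hr : ('"' : Char) ∈ rest := by
        rcases List.mem_cons.mp h with h1 | h1
        · exact absurd h1.symm hc
        · exact h1
      obtain ⟨pre, suf, heq, hn⟩ := ih hr
      exact ⟨c :: pre, suf, by simp [heq], by simp [hn, Ne.symm hc]⟩


theorem pv_isIn_quote_iff (s : List Char) :
    PySem.Chars.isIn ['"'] s = true ↔ ('"' : Char) ∈ s := by

  rw [PySem.Chars.isIn_iff_infix]
  constructor
  · rintro ⟨u, v, rfl⟩; simp
  · intro h
    obtain ⟨u, v, rfl⟩ := List.append_of_mem h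
    exact ⟨u, v, by simp⟩


theorem pv_find_decomp (pre suf : List Char) (h : ('"' : Char) ∉ pre) :
    PySem.Chars.find (pre ++ '"' :: suf) ['"'] = (pre.length : Int) := by

  have hin : ['"'] <:+: (pre ++ '"' :: suf) := ⟨pre, suf, by simp⟩
  have h0 : 0 ≤ PySem.Chars.find (pre ++ '"' :: suf) ['"'] :=
    (PySem.Chars.find_nonneg_iff _ _).mpr hin
  obtain ⟨hpref, hmin⟩ := PySem.Chars.find_spec h0
  set k := (PySem.Chars.find (pre ++ '"' :: suf) ['"']).toNat with hk
  have hget : ∀ j, [('"' : Char)] <+: List.drop j (pre ++ '"' :: suf) →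
      (pre ++ '"' :: suf)[j]? = some '"' := by
    intro j hj
    obtain ⟨u, hu⟩ := hj
    rw [← List.head?_drop, ← hu]; rfl
  have hklt : ¬ k < pre.length := by
    intro hlt
    have := hget k hpref
    rw [List.getElem?_append_left hlt] at this
    exact h (List.mem_of_getElem? this)
  have hkgt : ¬ pre.length < k := by
    intro hlt
    exact hmin pre.length hlt (by rw [List.drop_left]; exact ⟨suf, rfl⟩)
  have : k = pre.length := by omega
  omega


theorem pvLoopA_skip (d : List (String × List String)) (l r : List Char) (p : Nat) (acc : List Char) :
    pvLoopA d (l ++ r) p l.length acc = pvLoopA d r p 0 acc := by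

  induction l generalizing acc with
  | nil => simp
  | cons a l' ih => simpa [pvLoopA] using ih acc


theorem pvLoopA_overrun (d : List (String × List String)) (xs : List Char) (p n : Nat)
    (acc : List Char) (h : xs.length ≤ n) : pvLoopA d xs p n acc = acc := by

  induction xs generalizing n with
  | nil => rfl
  | cons a t ih =>
    simp only [pvLoopA]
    rw [if_neg (by simp at h; omega)]
    exact ih (n - 1) (by simp at h ⊢; omega)


theorem pvGoB_nil_part (d : List (String × List String)) (parts : List (List Char)) (i : Nat)
    (acc : List Char) : pvGoB d ([] :: parts) i acc = pvGoB d parts (i + 1) acc := by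

  simp only [pvGoB]
  split_ifs <;> simp


theorem pv_main (d : List (String × List String)) :
    ∀ n s p i acc, List.length s = n → p % 2 = i % 2 →
      pvLoopA d s p 0 acc = pvGoB d (pvSplitS s) i acc := by

  intro n
  induction n using Nat.strong_induction_on with
  | _ n ih =>
    intro s p i acc hlen hpar
    cases s with
    | nil =>
      show pvLoopA d [] p 0 acc = pvGoB d [[]] i acc
      rw [pvGoB_nil_part]
      rfl
    | cons c rest =>
      by_cases hc : c = '"'
      · have e1 : pvLoopA d (c :: rest) p 0 acc = pvLoopA d rest (p + 1) 0 acc := by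
          simp [pvLoopA, hc]
        have e2 : pvSplitS (c :: rest) = [] :: pvSplitS rest := by simp [pvSplitS, hc]
        rw [e1, e2, pvGoB_nil_part]
        exact ih rest.length (by simp at hlen; omega) rest (p + 1) (i + 1) acc rfl (by omega)
      · by_cases hp : p % 2 = 0
        · have hi : i % 2 = 0 := by omega
          by_cases hq : ('"' : Char) ∈ c :: rest
          · obtain ⟨pre, suf, heq, hnp⟩ := pv_exists_decomp _ hq
            cases pre with
            | nil => simp at heq; exact absurd heq.1 hc
            | cons a pre' =>
              rw [List.cons_append] at heq
              obtain ⟨hca, hrest⟩ := List.cons.inj heq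
              subst hca
              simp only [List.mem_cons, not_or] at hnp
              have hnp' : ('"' : Char) ∉ pre' := hnp.2
              have hin : PySem.Chars.isIn ['"'] (c :: rest) = true :=
                (pv_isIn_quote_iff _).mpr hq
              have hfind : PySem.Chars.find (c :: rest) ['"'] = ((pre'.length + 1 : Nat) : Int) := by
                have := pv_find_decomp (c :: pre') suf (by
                  simp only [List.mem_cons, not_or]
                  exact ⟨Ne.symm hc, hnp'⟩)
                rw [show (c :: rest) = (c :: pre') ++ '"' :: suf by simp [hrest]]
                simpa using this
              have htake : List.take (pre'.length + 1) (c :: rest) = c :: pre' := by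
                rw [show (c :: rest) = (c :: pre') ++ '"' :: suf by simp [hrest]]
                exact List.length_cons .. ▸ List.take_left (l₁ := c :: pre') (l₂ := '"' :: suf)
              have e1 : pvLoopA d (c :: rest) p 0 acc =
                  pvLoopA d rest p pre'.length (List.reverseAux (pvSubst d (c :: pre')) acc) := by
                simp [pvLoopA, hc, hp, hin, hfind, htake]
              have e2 : pvLoopA d rest p pre'.length (List.reverseAux (pvSubst d (c :: pre')) acc) =
                  pvLoopA d suf (p + 1) 0 (List.reverseAux (pvSubst d (c :: pre')) acc) := by
                rw [hrest, pvLoopA_skip]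
                simp [pvLoopA]
              have e3 : pvSplitS (c :: rest) = (c :: pre') :: pvSplitS suf := by
                rw [show (c :: rest) = (c :: pre') ++ '"' :: suf by simp [hrest]]
                exact pvSplitS_decomp _ _ (by
                  simp only [List.mem_cons, not_or]
                  exact ⟨Ne.symm hc, hnp'⟩)
              have e4 : pvGoB d ((c :: pre') :: pvSplitS suf) i acc =
                  pvGoB d (pvSplitS suf) (i + 1) (List.reverseAux (pvSubst d (c :: pre')) acc) := by
                simp [pvGoB, hi]
              rw [e1, e2, e3, e4]
              exact ih suf.length (by
                  have := congrArg List.length heq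
                  simp at this hlen
                  omega) suf (p + 1) (i + 1) _ rfl (by omega)
          · have hin : PySem.Chars.isIn ['"'] (c :: rest) = false := by
              rw [Bool.eq_false_iff]
              intro hcon
              exact hq ((pv_isIn_quote_iff _).mp hcon)
            have e1 : pvLoopA d (c :: rest) p 0 acc =
                pvLoopA d rest p (c :: rest).length (List.reverseAux (pvSubst d (c :: rest)) acc) := by
              simp [pvLoopA, hc, hp, hin]
            have e2 : pvSplitS (c :: rest) = [c :: rest] :=
              pvSplitS_no_quote _ hq
            rw [e1, e2, pvLoopA_overrun d rest p _ _ (by simp)]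
            simp [pvGoB, hi]
        · have hi : ¬ i % 2 = 0 := by omega
          have hne := pvSplitS_ne_nil rest
          cases hsp : pvSplitS rest with
          | nil => exact absurd hsp hne
          | cons h t =>
            have e1 : pvLoopA d (c :: rest) p 0 acc =
                pvLoopA d rest p 0 (List.reverseAux (PySem.Int.toChars (c.toNat : Int)) acc) := by
              simp [pvLoopA, hc, hp]
            have e2 : pvSplitS (c :: rest) = (c :: h) :: t := by
              simp only [pvSplitS]
              rw [if_neg hc, hsp]
            have e3 : pvGoB d ((c :: h) :: t) i acc =
                pvGoB d t (i + 1)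
                  (List.foldl (fun a ch => List.reverseAux (PySem.Int.toChars (ch.toNat : Int)) a)
                    (List.reverseAux (PySem.Int.toChars (c.toNat : Int)) acc) h) := by
              simp [pvGoB, hi]
            have e4 := ih rest.length (by simp at hlen; omega) rest p i
              (List.reverseAux (PySem.Int.toChars (c.toNat : Int)) acc) rfl hpar
            rw [e1, e4, hsp, e2, e3]
            simp [pvGoB, hi]


-- ===== VERDICT (by name: the statement is the Claim_ definition above) =====
theorem processToken_spec : Claim_equal_processToken := by
  intro setTokens dictCharacters _
  unfold Spec_processToken processToken processToken_alt
  have := pv_main dictCharacters (pvPreamble setTokens).1.length (pvPreamble setTokens).1 0 0 [] rfl rfl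
  simp [this, pvSplitQ_eq_pvSplitS]
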